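-- pv_equiv track=rewrite | github.com/PLeVasseur/opencode-project-agents | fls/reports/glossary-single-source-phase1-four-check-remediation-20260213T193115Z/compute_diagnostics.py | extract_hygiene_section
-- ===== SOURCE A (Python) =====
-- def extract_hygiene_section(text: str) -> str:
--     lines = text.splitlines()
--     start = None
--     for i in range(len(lines) - 1):
--         if lines[i].strip() == "Hygiene" and set(lines[i + 1].strip()) == {"-"}:
--             start = i
--             break
--     if start is None:
--         return text
--     end = len(lines)
--     for j in range(start + 2, len(lines)):
--         if lines[j].startswith(".. _fls_"):
--             end = j
--             break
--     return "\n".join(lines[start:end]).rstrip() + "\n"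
-- ===== SOURCE B (Python) =====
-- def extract_hygiene_section(text: str) -> str:
--     lines = text.splitlines()
--     rest = lines
--     while len(rest) >= 2:
--         underline = rest[1].strip()
--         if rest[0].strip() == "Hygiene" and underline and all(c == "-" for c in underline):
--             body = []
--             for line in rest[2:]:
--                 if line.startswith(".. _fls_"):
--                     break
--                 body.append(line)
--             return "\n".join(rest[:2] + body).rstrip() + "\n"
--         rest = rest[1:]
--     return text
-- ===== Notes on version B (the rewrite author's own statement) =====
-- stated objective: alternative
-- what changed: Two separate index-based scans (find start index over range, then find end index) are replaced by a single structural recursion over list suffixes that, on finding the header pair, takes the body with a takeWhile-style collect loop and returns immediately.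
import Mathlib
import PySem

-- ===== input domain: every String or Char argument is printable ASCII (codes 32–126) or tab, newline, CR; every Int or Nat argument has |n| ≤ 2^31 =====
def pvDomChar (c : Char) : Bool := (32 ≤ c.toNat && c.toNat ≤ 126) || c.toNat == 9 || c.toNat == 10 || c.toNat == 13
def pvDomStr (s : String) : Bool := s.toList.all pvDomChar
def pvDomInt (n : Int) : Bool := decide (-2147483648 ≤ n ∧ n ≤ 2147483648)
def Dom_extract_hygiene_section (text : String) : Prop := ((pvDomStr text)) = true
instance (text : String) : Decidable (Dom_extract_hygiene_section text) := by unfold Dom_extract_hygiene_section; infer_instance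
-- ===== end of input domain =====

-- B replaces A's two index-based scans by one structural recursion over list suffixes; alternative decomposition, same cost.

-- ===== PORT A =====
-- lines[i].strip() == "Hygiene" and set(lines[i+1].strip()) == {"-"}
def pvCondA (lines : List String) (i : Nat) : Bool :=
  PySem.Str.strip (lines.getD i "") == "Hygiene" &&
  PySem.Set.equal (PySem.Set.ofList (PySem.Str.strip (lines.getD (i + 1) "")).toList) ['-']

-- for i in range(len(lines) - 1): … break
def pvLoopA1 (lines : List String) (i : Nat) : Option Nat :=
  if _h : i < lines.length - 1 then
    if pvCondA lines i then some i else pvLoopA1 lines (i + 1)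
  else none
termination_by lines.length - i

-- for j in range(start + 2, len(lines)): … break   (end defaults to len(lines))
def pvLoopA2 (lines : List String) (j : Nat) : Nat :=
  if _h : j < lines.length then
    if PySem.Str.startswith (lines.getD j "") ".. _fls_" then j else pvLoopA2 lines (j + 1)
  else lines.length
termination_by lines.length - j

def extract_hygiene_section (text : String) : String :=
  let lines := PySem.Str.splitlines text
  match pvLoopA1 lines 0 with
  | none => text
  | some start =>
    let e := pvLoopA2 lines (start + 2)
    PySem.Str.rstrip (PySem.Str.join "\n" (PySem.List.slice lines (some (start : Int)) (some (e : Int)))) ++ "\n"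

-- ===== PORT B =====
-- rest[0].strip() == "Hygiene" and underline and all(c == "-" for c in underline)
def pvIsHeader (a b : String) : Bool :=
  PySem.Str.strip a == "Hygiene" &&
  (let u := PySem.Str.strip b
   u != "" && u.toList.all (fun c => c == '-'))

-- Source B's while-loop over suffixes (rest = rest[1:])
def pvFindHeader : List String → Option (String × String × List String)
  | a :: b :: t => if pvIsHeader a b then some (a, b, t) else pvFindHeader (b :: t)
  | _ => none

-- the for/break/append body loop of Source B is List.takeWhile
def extract_hygiene_section_alt (text : String) : String :=
  let lines := PySem.Str.splitlines text
  match pvFindHeader lines with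
  | none => text
  | some (a, b, t) =>
    PySem.Str.rstrip (PySem.Str.join "\n"
      (a :: b :: t.takeWhile (fun l => !PySem.Str.startswith l ".. _fls_"))) ++ "\n"

-- ===== PRECONDITION & SPEC =====
def Spec_extract_hygiene_section (text : String) (out : String) : Prop := out = extract_hygiene_section_alt text
instance (text : String) (out : String) : Decidable (Spec_extract_hygiene_section text out) := by unfold Spec_extract_hygiene_section; infer_instance

-- ===== CLAIM (what is proved, stated in full; the proofs are below) =====
def Claim_equal_extract_hygiene_section : Prop := ∀ (text : String), Dom_extract_hygiene_section text → Spec_extract_hygiene_section text (extract_hygiene_section text)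

-- ===== LEMMAS AND PROOFS =====

-- set(u) == {"-"}  ⟺  u is nonempty and consists only of dashes
theorem pv_dashset (cs : List Char) :
    PySem.Set.equal (PySem.Set.ofList cs) ['-'] =
      (decide (cs ≠ []) && cs.all (fun c => c == '-')) := by
  rw [Bool.eq_iff_iff, PySem.Set.equal_iff]
  simp only [PySem.Set.mem_ofList, List.mem_singleton, Bool.and_eq_true, decide_eq_true_eq,
    List.all_eq_true, beq_iff_eq]
  constructor
  · intro h
    have hm : '-' ∈ cs := (h '-').mpr rfl
    exact ⟨by rintro rfl; simp at hm, fun c hc => (h c).mp hc⟩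
  · rintro ⟨hne, hall⟩ x
    refine ⟨fun hx => hall x hx, ?_⟩
    rintro rfl
    rcases cs with _ | ⟨c, cs'⟩
    · exact absurd rfl hne
    · exact (hall c (by simp)) ▸ List.mem_cons_self

-- A's header test at index s equals B's header test on the suffix's first two lines
theorem pv_cond_eq (lines : List String) (s : Nat) (a b : String) (t : List String)
    (hd : lines.drop s = a :: b :: t) :
    pvCondA lines s = pvIsHeader a b := by
  have ha : lines[s]? = some a := by
    have h0 : (lines.drop s)[0]? = lines[s+0]? := List.getElem?_drop
    rw [hd] at h0; simpa using h0.symm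
  have hb : lines[s+1]? = some b := by
    have h1 : (lines.drop s)[1]? = lines[s+1]? := List.getElem?_drop
    rw [hd] at h1; simpa using h1.symm
  have ha' : lines.getD s "" = a := by simp [List.getD_eq_getElem?_getD, ha]
  have hb' : lines.getD (s+1) "" = b := by simp [List.getD_eq_getElem?_getD, hb]
  rw [pvCondA, pvIsHeader, ha', hb', pv_dashset]
  have hne : (decide ((PySem.Str.strip b).toList ≠ [])) = (PySem.Str.strip b != "") := by
    rw [Bool.eq_iff_iff]
    simp [bne_iff_ne, String.ext_iff]
  rw [hne]

-- A's first scan from i finds exactly what B's suffix recursion finds on lines.drop i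
theorem pv_loop1 (l : List String) : ∀ (lines : List String) (i : Nat),
    lines.drop i = l →
    (match pvFindHeader l with
     | none => pvLoopA1 lines i = none
     | some (a, b, t) => ∃ s, pvLoopA1 lines i = some s ∧ lines.drop s = a :: b :: t) := by
  induction l with
  | nil =>
    intro lines i hd
    have hlen : lines.length - i = 0 := by
      have := congrArg List.length hd; simpa using this
    simp only [pvFindHeader]
    rw [pvLoopA1]
    simp only [show ¬ (i < lines.length - 1) by omega, dif_neg, not_false_iff]
  | cons a rest ih =>
    intro lines i hd
    rcases rest with _ | ⟨b, t⟩
    · have hlen : lines.length - i = 1 := by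
        have := congrArg List.length hd; simpa using this
      simp only [pvFindHeader]
      rw [pvLoopA1]
      simp only [show ¬ (i < lines.length - 1) by omega, dif_neg, not_false_iff]
    · have hlen : lines.length - i = t.length + 2 := by
        have := congrArg List.length hd; simp at this; omega
      have hlt : i < lines.length - 1 := by omega
      have hd' : lines.drop (i+1) = b :: t := by
        rw [← List.tail_drop, hd]; rfl
      rw [pvFindHeader, pvLoopA1]
      rw [dif_pos hlt, pv_cond_eq lines i a b t hd]
      by_cases hc : pvIsHeader a b
      · simp only [hc, if_pos]
        exact ⟨i, rfl, hd⟩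
      · simp only [hc, if_neg, Bool.false_eq_true, not_false_iff]
        exact ih lines (i+1) hd'

-- A's second scan from j returns j plus the length of B's takeWhile body on lines.drop j
theorem pv_loop2 (lines : List String) : ∀ (j : Nat), j ≤ lines.length →
    pvLoopA2 lines j =
      j + ((lines.drop j).takeWhile (fun l => !PySem.Str.startswith l ".. _fls_")).length := by
  have H : ∀ (n j : Nat), j ≤ lines.length → lines.length - j = n →
      pvLoopA2 lines j =
        j + ((lines.drop j).takeWhile (fun l => !PySem.Str.startswith l ".. _fls_")).length := by
    intro n
    induction n with
    | zero =>
      intro j hj h0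
      have hje : j = lines.length := by omega
      rw [pvLoopA2]
      simp [hje]
    | succ n ihn =>
      intro j hj hn
      have hlt : j < lines.length := by omega
      have hdrop : lines.drop j = lines[j] :: lines.drop (j+1) :=
        List.drop_eq_getElem_cons hlt
      have hg : lines.getD j "" = lines[j] := by
        simp [List.getD_eq_getElem?_getD, List.getElem?_eq_getElem hlt]
      rw [pvLoopA2, dif_pos hlt, hg, hdrop]
      simp only [List.takeWhile_cons]
      by_cases hs : PySem.Str.startswith lines[j] ".. _fls_"
      · rw [if_pos hs, hs]
        simp
      · have hs' : PySem.Str.startswith lines[j] ".. _fls_" = false := Bool.eq_false_iff.mpr hs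
        rw [if_neg hs, hs', ihn (j+1) (by omega) (by omega)]
        simp
        omega
  exact fun j hj => H (lines.length - j) j hj rfl

theorem pv_take_takeWhile {α : Type} (p : α → Bool) (t : List α) :
    t.take (t.takeWhile p).length = t.takeWhile p := by
  induction t with
  | nil => rfl
  | cons x xs ih =>
    by_cases h : p x <;> simp [h, ih]

theorem pv_main (text : String) : extract_hygiene_section text = extract_hygiene_section_alt text := by
  simp only [extract_hygiene_section, extract_hygiene_section_alt]
  set lines := PySem.Str.splitlines text with hl
  have key := pv_loop1 lines lines 0 (by simp)
  cases hf : pvFindHeader lines with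
  | none =>
    rw [hf] at key
    simp only at key
    rw [key]
  | some r =>
    obtain ⟨a, b, t⟩ := r
    rw [hf] at key
    simp only at key
    obtain ⟨s, hs, hdrop⟩ := key
    rw [hs]
    simp only
    have hlen : lines.length - s = t.length + 2 := by
      have := congrArg List.length hdrop; simp at this; omega
    have hsle : s + 2 ≤ lines.length := by omega
    have hdt : lines.drop (s + 2) = t := by
      have := congrArg (List.drop 2) hdrop
      rw [List.drop_drop] at this
      simpa [Nat.add_comm] using this
    have h2 := pv_loop2 lines (s + 2) hsle
    rw [hdt] at h2
    rw [h2]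
    set k := (t.takeWhile (fun l => !PySem.Str.startswith l ".. _fls_")).length with hk
    have hslice : PySem.List.slice lines (some (s : Int)) (some ((s + 2 + k : Nat) : Int)) =
        a :: b :: t.takeWhile (fun l => !PySem.Str.startswith l ".. _fls_") := by
      rw [PySem.List.slice_natCast, hdrop]
      have : s + 2 + k - s = 2 + k := by omega
      rw [this, show 2 + k = k + 1 + 1 from by omega, List.take_succ_cons,
        List.take_succ_cons, hk, pv_take_takeWhile]
    rw [hslice]

-- ===== VERDICT (by name: the statement is the Claim_ definition above) =====
theorem extract_hygiene_section_spec : Claim_equal_extract_hygiene_section := by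
  intro text _
  unfold Spec_extract_hygiene_section
  exact pv_main text
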